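-- pv_equiv track=rewrite | github.com/collectiegroesbeek/collectiegroesbeek | ingest/find_spelling_mistakes.py | find_edit_distance_1
-- ===== SOURCE A (Python) =====
-- import string
--
-- def find_edit_distance_1(word: str, all_words: dict[str, int]) -> set[str]:
--     candidates: set[str] = set()
--     for i in range(len(word)):
--         left = word[:i]
--         right = word[i + 1 :]
--         for letter in string.ascii_lowercase:
--             new_word = left + letter + right
--             if new_word in all_words:
--                 candidates.add(new_word)
--     candidates.remove(word)
--     return candidates
-- ===== SOURCE B (Python) =====
-- import string
--
-- def find_edit_distance_1(word: str, all_words: dict[str, int]) -> set[str]: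
--     """Dictionary words obtained from `word` by substituting one lowercase letter."""
--     def go(prefix: str, suffix: str) -> set[str]:
--         if not suffix:
--             return set()
--         variants = {prefix + c + suffix[1:] for c in string.ascii_lowercase}
--         return (variants & all_words.keys()) | go(prefix + suffix[0], suffix[1:])
--     candidates = go("", word)
--     candidates.remove(word)
--     return candidates
-- ===== Notes on version B (the rewrite author's own statement) =====
-- stated objective: alternative
-- what changed: B recurses over the word one position at a time, building each position's 26 substitution variants as a set and intersecting it with the dictionary's key view, union-ing the per-position results, instead of A's nested for-loops that probe the dict for each candidate and mutate one accumulator set; both end with candidates.remove(word), and Pre_ excludes the inputs where that remove raises KeyError (word not a dictionary key, or word containing no lowercase letter).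
import Mathlib
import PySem

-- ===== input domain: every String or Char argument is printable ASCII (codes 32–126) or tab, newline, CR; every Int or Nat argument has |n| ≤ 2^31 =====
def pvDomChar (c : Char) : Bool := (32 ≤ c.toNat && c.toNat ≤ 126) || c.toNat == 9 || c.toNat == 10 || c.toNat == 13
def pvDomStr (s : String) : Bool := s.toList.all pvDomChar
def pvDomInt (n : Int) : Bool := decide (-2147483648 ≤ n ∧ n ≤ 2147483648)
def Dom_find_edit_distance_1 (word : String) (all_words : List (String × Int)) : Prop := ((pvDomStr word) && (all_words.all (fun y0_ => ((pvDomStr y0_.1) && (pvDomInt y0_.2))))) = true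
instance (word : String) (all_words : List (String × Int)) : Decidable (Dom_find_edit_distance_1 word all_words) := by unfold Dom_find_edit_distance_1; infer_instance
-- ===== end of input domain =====

-- B recurses over the word one position at a time and combines each position's 26 substitution
-- variants with the dictionary keys by set algebra (intersection, union), instead of A's nested
-- loops that test candidates one by one against the dict and mutate one accumulator set.
-- Both Pythons return a set; the ports return its distinct elements as a list.

-- ===== PORT A =====
def pvLowercase : List Char := "abcdefghijklmnopqrstuvwxyz".toList  -- string.ascii_lowercase

def find_edit_distance_1 (word : String) (all_words : List (String × Int)) : List String :=
  let d : PySem.Dict String Int := PySem.Dict.mk all_words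
  let cs : List Char := word.toList
  let candidates : PySem.Set String :=
    (PySem.List.pyRange 0 (PySem.Str.len word) 1).foldl (fun cand i =>
      let left := PySem.List.slice cs none (some i)          -- word[:i]
      let right := PySem.List.slice cs (some (i + 1)) none   -- word[i+1:]
      pvLowercase.foldl (fun cand letter =>
        let new_word := String.ofList (left ++ letter :: right)  -- left + letter + right
        if d.contains new_word then PySem.Set.add cand new_word else cand) cand)
      PySem.Set.empty
  match PySem.Set.remove? candidates word with               -- candidates.remove(word)
  | some r => r
  | none => []                                               -- KeyError: excluded by Pre_

-- ===== PORT B =====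
-- go(prefix, suffix): dictionary hits obtainable by substituting inside suffix (word = prefix + suffix)
def pvGo (word : String) (d : PySem.Dict String Int) (pre suf : List Char) : PySem.Set String :=
  match suf with
  | [] => PySem.Set.empty
  | hd :: rest =>
    -- variants = {prefix + c + suffix[1:] for c in string.ascii_lowercase}
    let variants : PySem.Set String :=
      PySem.Set.ofList (pvLowercase.map (fun c => String.ofList (pre ++ c :: rest)))
    -- (variants & all_words.keys()) | go(prefix + suffix[0], suffix[1:])
    PySem.Set.union (PySem.Set.inter variants (PySem.Dict.keys d))
      (pvGo word d (pre ++ [hd]) rest)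

def find_edit_distance_1_alt (word : String) (all_words : List (String × Int)) : List String :=
  let candidates := pvGo word (PySem.Dict.mk all_words) [] word.toList   -- go("", word)
  match PySem.Set.remove? candidates word with               -- candidates.remove(word)
  | some r => r
  | none => []                                               -- KeyError: excluded by Pre_

-- ===== PRECONDITION & SPEC =====
-- Pre_ excludes exactly the inputs on which A (and B) raise KeyError at candidates.remove(word):
-- word must be a key of all_words and contain at least one lowercase a-z letter.
def Pre_find_edit_distance_1 (word : String) (all_words : List (String × Int)) : Prop :=
  (all_words.map (·.1)).contains word = true ∧
  (word.toList.any (fun c => decide ('a' ≤ c) && decide (c ≤ 'z'))) = true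
instance (word : String) (all_words : List (String × Int)) : Decidable (Pre_find_edit_distance_1 word all_words) := by unfold Pre_find_edit_distance_1; infer_instance

def pvWitness_find_edit_distance_1 : String × (List (String × Int)) := ("cat", [("cat", 1), ("bat", 2), ("cot", 3)])

def Spec_find_edit_distance_1 (word : String) (all_words : List (String × Int)) (out : List String) : Prop := out = find_edit_distance_1_alt word all_words
instance (word : String) (all_words : List (String × Int)) (out : List String) : Decidable (Spec_find_edit_distance_1 word all_words out) := by unfold Spec_find_edit_distance_1; infer_instance

-- ===== CLAIM (what is proved, stated in full; the proofs are below) =====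
def Claim_equal_find_edit_distance_1 : Prop := ∀ (word : String) (all_words : List (String × Int)), Dom_find_edit_distance_1 word all_words → Pre_find_edit_distance_1 word all_words → Spec_find_edit_distance_1 word all_words (find_edit_distance_1 word all_words)

-- ===== LEMMAS AND PROOFS =====

-- canonical middle form: the distinct-elements set both programs build before removing `word` is
-- set() of the dictionary hits among all substitutions, enumerated by (position, letter)

def pvSub (cs : List Char) (i : Nat) (c : Char) : List Char := cs.take i ++ c :: cs.drop (i + 1)

def pvToWord (cs : List Char) (p : Nat × Char) : String := String.ofList (pvSub cs p.1 p.2)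

def pvPairFn (i : Nat) : List (Nat × Char) := pvLowercase.map (fun c => (i, c))

def pvHits (word : String) (all_words : List (String × Int)) (l : List Nat) : List String :=
  ((l.flatMap pvPairFn).map (pvToWord word.toList)).filter
    (fun s => (PySem.Dict.mk all_words).contains s)

-- set-fold shapes -------------------------------------------------------------

lemma pvUpdateAppend {α : Type} [BEq α] (s : PySem.Set α) (l₁ l₂ : List α) :
    PySem.Set.update s (l₁ ++ l₂) = PySem.Set.update (PySem.Set.update s l₁) l₂ :=
  List.foldl_append

lemma pvFoldAddIf {α β : Type} [BEq α] (l : List β) (f : β → α) (P : α → Bool)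
    (s0 : PySem.Set α) :
    l.foldl (fun s x => if P (f x) then PySem.Set.add s (f x) else s) s0
      = PySem.Set.update s0 ((l.map f).filter P) := by
  induction l generalizing s0 with
  | nil => rfl
  | cons x l ih =>
    simp only [List.foldl_cons, List.map_cons, List.filter_cons]
    cases hp : P (f x)
    · simp [ih]
    · simp [ih]

lemma pvFoldUpdate {α β : Type} [BEq β] (l : List α) (F : α → List β) (s0 : PySem.Set β) :
    l.foldl (fun s i => PySem.Set.update s (F i)) s0 = PySem.Set.update s0 (l.flatMap F) := by
  induction l generalizing s0 with
  | nil => rfl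
  | cons x l ih => simp only [List.foldl_cons, List.flatMap_cons, pvUpdateAppend, ih]

lemma pvUpdateOfList {α : Type} [BEq α] [LawfulBEq α] (s : PySem.Set α) (l : List α) :
    PySem.Set.update s (PySem.Set.ofList l) = PySem.Set.update s l := by
  rw [PySem.Set.update_eq_append_filter, PySem.Set.update_eq_append_filter,
    PySem.Set.ofList_ofList]

-- shape of port A --------------------------------------------------------------

lemma pvFlatMapFilter {α β : Type} (l : List α) (F : α → List β) (P : β → Bool) :
    l.flatMap (fun a => (F a).filter P) = (l.flatMap F).filter P := by
  induction l with
  | nil => rfl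
  | cons x l ih => simp [List.flatMap_cons, List.filter_append, ih]

lemma pvMapPairs (cs : List Char) (l : List Nat) :
    (l.flatMap pvPairFn).map (pvToWord cs)
      = l.flatMap (fun k => pvLowercase.map (fun c => pvToWord cs (k, c))) := by
  simp [pvPairFn, List.map_flatMap, List.map_map, Function.comp_def]

lemma pvShapeA (word : String) (aw : List (String × Int)) :
    find_edit_distance_1 word aw =
      (match PySem.Set.remove?
          (PySem.Set.ofList (pvHits word aw (List.range word.toList.length))) word with
        | some r => r
        | none => []) := by
  unfold find_edit_distance_1
  simp only [PySem.Str.len_eq, PySem.List.pyRange_zero_nat, List.foldl_map]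
  have hsl1 : ∀ (k : Nat), PySem.List.slice word.toList none (some ((k : Nat) : Int))
      = word.toList.take k := fun k => PySem.List.slice_to_natCast _ k
  have hsl2 : ∀ (k : Nat), PySem.List.slice word.toList (some (((k : Nat) : Int) + 1)) none
      = word.toList.drop (k + 1) := by
    intro k
    rw [show ((k : Nat) : Int) + 1 = (((k + 1 : Nat) : Nat) : Int) by push_cast; ring]
    exact PySem.List.slice_from_natCast _ (k + 1)
  simp only [hsl1, hsl2]
  have hinner : ∀ (k : Nat) (cand : PySem.Set String),
      pvLowercase.foldl (fun cand letter =>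
        if (PySem.Dict.mk aw).contains (String.ofList (word.toList.take k ++ letter :: word.toList.drop (k + 1)))
        then PySem.Set.add cand (String.ofList (word.toList.take k ++ letter :: word.toList.drop (k + 1)))
        else cand) cand
      = PySem.Set.update cand
          ((pvLowercase.map (fun c => pvToWord word.toList (k, c))).filter
            (fun s => (PySem.Dict.mk aw).contains s)) := by
    intro k cand
    exact pvFoldAddIf pvLowercase (fun c => pvToWord word.toList (k, c))
      (fun s => (PySem.Dict.mk aw).contains s) cand
  simp only [hinner]
  rw [pvFoldUpdate, pvFlatMapFilter]
  unfold pvHits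
  rw [pvMapPairs]
  rfl

-- shape of port B --------------------------------------------------------------

lemma pvGo_eq (word : String) (aw : List (String × Int)) :
    ∀ (suf pre : List Char), pre ++ suf = word.toList →
      pvGo word (PySem.Dict.mk aw) pre suf
        = PySem.Set.ofList (pvHits word aw (List.range' pre.length suf.length)) := by
  intro suf
  induction suf with
  | nil =>
    intro pre h
    simp [pvGo, pvHits, PySem.Set.empty, PySem.Set.ofList]
  | cons hd rest ih =>
    intro pre h
    have hpre : word.toList.take pre.length = pre := by
      rw [← h]; exact List.take_left
    have hrest : word.toList.drop (pre.length + 1) = rest := by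
      rw [← h, List.append_cons]
      exact List.drop_left' (by simp)
    have hsubeq : ∀ c : Char, pre ++ c :: rest = pvSub word.toList pre.length c := by
      intro c; unfold pvSub; rw [hpre, hrest]
    have hL : pvLowercase.map (fun c => String.ofList (pre ++ c :: rest))
        = (pvPairFn pre.length).map (pvToWord word.toList) := by
      unfold pvPairFn
      rw [List.map_map]
      apply List.map_congr_left
      intro c _
      simp only [Function.comp]
      unfold pvToWord
      rw [hsubeq c]
    have hinj : Function.Injective (fun c : Char => String.ofList (pre ++ c :: rest)) := by
      intro a b hab
      have h2 := congrArg String.toList hab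
      simp only [String.toList_ofList] at h2
      have h3 := List.append_cancel_left h2
      simpa using h3
    have hnodupL : (pvLowercase.map (fun c => String.ofList (pre ++ c :: rest))).Nodup :=
      List.Nodup.map hinj (by decide)
    have hkeys : ∀ x : String,
        PySem.Set.contains (PySem.Dict.keys (PySem.Dict.mk aw)) x
          = (PySem.Dict.mk aw).contains x := by
      intro x
      rw [Bool.eq_iff_iff, PySem.Set.contains_iff, PySem.Dict.contains_iff_mem_keys]
    have hnodupHead : ((pvLowercase.map (fun c => String.ofList (pre ++ c :: rest))).filter
        (fun s => (PySem.Dict.mk aw).contains s)).Nodup := hnodupL.filter _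
    have hdecomp : pvHits word aw (List.range' pre.length (rest.length + 1))
        = ((pvLowercase.map (fun c => String.ofList (pre ++ c :: rest))).filter
            (fun s => (PySem.Dict.mk aw).contains s))
          ++ pvHits word aw (List.range' (pre.length + 1) rest.length) := by
      rw [List.range'_succ]
      unfold pvHits
      rw [List.flatMap_cons, List.map_append, List.filter_append, hL]
    show PySem.Set.union _ _ = _
    rw [ih (pre ++ [hd]) (by simpa using h)]
    simp only [List.length_append, List.length_cons, List.length_nil]
    unfold PySem.Set.union PySem.Set.inter
    rw [PySem.Set.ofList_eq_self_of_nodup _ hnodupL]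
    rw [List.filter_congr (fun x _ => hkeys x)]
    rw [pvUpdateOfList, hdecomp, PySem.Set.ofList_append,
      PySem.Set.ofList_eq_self_of_nodup _ hnodupHead]

lemma pvEq (word : String) (aw : List (String × Int)) :
    find_edit_distance_1 word aw = find_edit_distance_1_alt word aw := by
  rw [pvShapeA]
  unfold find_edit_distance_1_alt
  rw [pvGo_eq word aw word.toList [] (by simp)]
  rw [show List.range' (List.length ([] : List Char)) word.toList.length
        = List.range word.toList.length from (List.range_eq_range').symm]

-- ===== VERDICT (by name: the statement is the Claim_ definition above) =====
theorem find_edit_distance_1_spec : Claim_equal_find_edit_distance_1 := by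
  intro word aw _ _
  unfold Spec_find_edit_distance_1
  exact pvEq word aw
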